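-- pv_equiv track=rewrite | github.com/masslbs/network-schema | python/massmarket/mmr/algorithms.py | inclusion_proof_path
-- ===== SOURCE A (Python) =====
-- def inclusion_proof_path(i, c):
--     """Returns the list of node indices proving inclusion of i
--
--     Args:
--         i (int): The index of the node to whose inclusion path is required.
--         c (int): The index of the last node of any complete MMR that contains i.
--
--     Note that where i < c0; c0 < c1; the following hold
--
--         path_c0 = inclusion_proof_path(i, c0)
--         path_c1 = inclusion_proof_path(parent(path[c][-1]), c1)
--         path = inclusion_proof_path(i, c1) == path_c0 + path_c1
--
--     Returns
--         The inclusion path of i with respect to c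
--
--     """
--
--     # set the path to the empty list
--     path = []
--
--     # Set `g` to `index_height(i)`
--     g = index_height(i)
--
--     # Repeat until #termination_condition evaluates true
--     while True:
--
--         # Set `siblingoffset` to 2^(g+1)
--         siblingoffset = 2 << g
--
--         # If `index_height(i+1)` is greater than `g`
--         if index_height(i + 1) > g:
--
--             # Set isibling to `i - siblingoffset + 1`. because i is the right
--             # sibling, its witness is the left which is offset behind.
--             isibling = i - siblingoffset + 1
--
--             # Set `i` to `i+1`. the parent of a right sibling is always
--             # stored immediately after.
--             i += 1
--         else:
--
--             # Set isibling to `i + siblingoffset - 1`. because i is the left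
--             # sibling, its witness is the right and is offset ahead.
--             isibling = i + siblingoffset - 1
--
--             # Set `i` to `i+siblingoffset`. the parent of a left sibling is
--             # stored at 1 position ahead of the right sibling.
--             i += siblingoffset
--
--         # If `isibling` is greater than `ix`, return the collected path. this is
--         # the #termination_condition
--         if isibling > c:
--             return path
--
--         # Append isibling to the proof.
--         path.append(isibling)
--         # Increment the height index `g`.
--         g += 1
--
-- def index_height(i: int) -> int:
--     """Returns the 0 based height of the mmr entry indexed by i"""
--     # convert the index to a position to take advantage of the bit patterns afforded
--     pos = i + 1
--     while not all_ones(pos):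
--         pos = pos - (most_sig_bit(pos) - 1)
--
--     return pos.bit_length() - 1
--
-- def most_sig_bit(pos) -> int:
--     """Returns the mask for the the most significant bit in pos"""
--     return 1 << (pos.bit_length() - 1)
--
-- def all_ones(pos) -> bool:
--     """Returns true if all bits, starting with the most significant, are 1"""
--     imsb = pos.bit_length() - 1
--     mask = (1 << (imsb + 1)) - 1
--     return pos == mask
-- ===== SOURCE B (Python) =====
-- def _node_height(i):
--     """Height of MMR node index i via a single descending all-ones scan."""
--     s = (1 << i.bit_length()) - 1
--     while s:
--         if i >= s:
--             i -= s
--         s >>= 1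
--     return i
--
--
-- def inclusion_proof_path(i, c):
--     """Returns the list of node indices proving inclusion of i (w.r.t. c)."""
--     def walk(i, g):
--         siblingoffset = 2 << g
--         if _node_height(i + 1) > g:
--             isibling, i = i - siblingoffset + 1, i + 1
--         else:
--             isibling, i = i + siblingoffset - 1, i + siblingoffset
--         if isibling > c:
--             return []
--         return [isibling] + walk(i, g + 1)
--
--     return walk(i, _node_height(i))
-- ===== Notes on version B (the rewrite author's own statement) =====
-- stated objective: alternative
-- what changed: Node heights are computed by a single descending all-ones bit scan (grin-style peak scan) instead of A's nested peel-until-all-ones loop with most_sig_bit/all_ones helpers, and the path is built by a direct cons-recursion instead of A's while-loop with append.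
import Mathlib
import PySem

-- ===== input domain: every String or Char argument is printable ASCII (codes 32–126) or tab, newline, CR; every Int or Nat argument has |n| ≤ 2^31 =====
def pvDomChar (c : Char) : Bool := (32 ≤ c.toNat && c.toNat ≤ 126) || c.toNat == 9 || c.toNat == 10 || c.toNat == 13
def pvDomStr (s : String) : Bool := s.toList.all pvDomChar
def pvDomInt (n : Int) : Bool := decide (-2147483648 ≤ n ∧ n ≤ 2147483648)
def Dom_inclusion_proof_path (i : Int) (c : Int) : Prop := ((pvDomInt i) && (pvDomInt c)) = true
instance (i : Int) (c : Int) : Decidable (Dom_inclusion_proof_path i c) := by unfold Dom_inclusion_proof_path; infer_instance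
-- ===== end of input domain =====

-- B replaces A's nested peel-until-all-ones height computation by a single descending
-- all-ones bit scan and builds the path by cons-recursion instead of a while/append loop
-- (objective: alternative; same asymptotic loop count).

-- ===== PORT A =====
-- Python's n.bit_length() for n ≥ 0 is Nat.size.
def pyBitLen (n : Nat) : Nat := Nat.size n

-- most_sig_bit(pos) = 1 << (pos.bit_length() - 1); exact for pos ≥ 1 (all call sites).
def mostSigBit (pos : Nat) : Nat := 2 ^ (pyBitLen pos - 1)

-- all_ones(pos): pos == (1 << pos.bit_length()) - 1; exact for pos ≥ 0.
def allOnes (pos : Nat) : Bool := pos == 2 ^ (pyBitLen pos) - 1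

theorem peel_dec (pos : Nat) (h : ¬ allOnes pos = true) :
    pos - (mostSigBit pos - 1) < pos := by
  have h2 : 2 ≤ pos := by
    by_contra hc
    interval_cases pos
    · exact h (by simp [allOnes, pyBitLen, Nat.size_zero])
    · exact h (by simp [allOnes, pyBitLen, Nat.size_one])
  have hs : 2 ≤ Nat.size pos := by
    have := (Nat.lt_size (m := 1) (n := pos)).mpr (by omega)
    omega
  have hmsb : 2 ≤ mostSigBit pos := by
    have h1 : (2 : Nat) ^ 1 ≤ 2 ^ (pyBitLen pos - 1) :=
      Nat.pow_le_pow_right (by norm_num) (by unfold pyBitLen; omega)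
    simpa [mostSigBit] using h1
  omega

-- the while-loop of index_height: pos = pos - (most_sig_bit(pos) - 1) until all_ones(pos)
def peel (pos : Nat) : Nat :=
  if h : allOnes pos = true then pos
  else peel (pos - (mostSigBit pos - 1))
termination_by pos
decreasing_by exact peel_dec pos h

-- index_height(i); exact for i ≥ -1 (Pre_ gives i ≥ 0)
def indexHeightA (i : Int) : Int := (pyBitLen (peel ((i + 1).toNat)) : Int) - 1

-- the while True loop of A; fuel only makes the recursion total, it is never exhausted
-- on the sampled domain (|i|,|c| ≤ 2^31 gives well under 100 iterations).
def goA (fuel : Nat) (i g c : Int) (path : List Int) : List Int :=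
  match fuel with
  | 0 => path
  | fuel + 1 =>
    -- 2 << g, exact for g ≥ 0 (Python raises ValueError for g < 0, excluded by Pre_)
    let siblingoffset : Int := 2 * 2 ^ g.toNat
    let st :=
      if indexHeightA (i + 1) > g then (i - siblingoffset + 1, i + 1)
      else (i + siblingoffset - 1, i + siblingoffset)
    if st.1 > c then path
    else goA fuel st.2 (g + 1) c (path ++ [st.1])

def inclusion_proof_path (i : Int) (c : Int) : List Int :=
  goA (i.natAbs + c.natAbs + 64) i (indexHeightA i) c []

-- ===== PORT B =====
-- the while s loop of _node_height: subtract each descending all-ones mask that fits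
def scanAux (s v : Nat) : Nat :=
  if hs : s = 0 then v
  else scanAux (s / 2) (if s ≤ v then v - s else v)
termination_by s
decreasing_by exact Nat.div_lt_self (Nat.pos_of_ne_zero hs) (by norm_num)

-- _node_height(i); exact for i ≥ 0 (Pre_)
def nodeHeightB (i : Int) : Int :=
  (scanAux (2 ^ (Nat.size i.toNat) - 1) i.toNat : Int)

-- walk(i, g) of B; same fuel guard as A's port, never exhausted on the sampled domain
def walkB (fuel : Nat) (i g c : Int) : List Int :=
  match fuel with
  | 0 => []
  | fuel + 1 =>
    let siblingoffset : Int := 2 * 2 ^ g.toNat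
    let st :=
      if nodeHeightB (i + 1) > g then (i - siblingoffset + 1, i + 1)
      else (i + siblingoffset - 1, i + siblingoffset)
    if st.1 > c then []
    else st.1 :: walkB fuel st.2 (g + 1) c

def inclusion_proof_path_alt (i : Int) (c : Int) : List Int :=
  walkB (i.natAbs + c.natAbs + 64) i (nodeHeightB i) c

-- ===== PRECONDITION & SPEC =====
-- Pre_ excludes i < 0, where Python A never returns: it raises ValueError (negative
-- shift) at i = -1 and loops forever inside index_height for i ≤ -2.
def Pre_inclusion_proof_path (i : Int) (c : Int) : Prop := 0 ≤ i
instance (i : Int) (c : Int) : Decidable (Pre_inclusion_proof_path i c) := by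
  unfold Pre_inclusion_proof_path; infer_instance

def pvWitness_inclusion_proof_path : Int × Int := (5, 10)

def Spec_inclusion_proof_path (i : Int) (c : Int) (out : List Int) : Prop := out = inclusion_proof_path_alt i c
instance (i : Int) (c : Int) (out : List Int) : Decidable (Spec_inclusion_proof_path i c out) := by unfold Spec_inclusion_proof_path; infer_instance

-- ===== CLAIM (what is proved, stated in full; the proofs are below) =====
def Claim_equal_inclusion_proof_path : Prop := ∀ (i : Int) (c : Int), Dom_inclusion_proof_path i c → Pre_inclusion_proof_path i c → Spec_inclusion_proof_path i c (inclusion_proof_path i c)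

-- ===== LEMMAS AND PROOFS =====

theorem size_eq_b {n b : Nat} (hb : 1 ≤ b) (hlow : 2 ^ (b - 1) ≤ n) (hhigh : n < 2 ^ b) :
    Nat.size n = b := by
  have h1 : b - 1 < Nat.size n := Nat.lt_size.mpr hlow
  have h2 : Nat.size n ≤ b := Nat.size_le.mpr hhigh
  omega

theorem scanAux_zero (s : Nat) : scanAux s 0 = 0 := by
  induction s using Nat.strong_induction_on with
  | _ s ih =>
    rw [scanAux]
    split
    · rfl
    · rename_i hs
      have hle : ¬ s ≤ 0 := by omega
      simp only [hle, if_false]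
      exact ih (s / 2) (Nat.div_lt_self (Nat.pos_of_ne_zero hs) (by norm_num))

theorem pow_succ_div_two (k : Nat) : (2 ^ (k + 1) - 1) / 2 = 2 ^ k - 1 := by
  have h : 2 ^ (k + 1) = 2 * 2 ^ k := by ring
  have hk : 1 ≤ 2 ^ k := Nat.one_le_two_pow
  omega

theorem scan_skip (k v : Nat) (h : Nat.size v ≤ k) :
    scanAux (2 ^ k - 1) v = scanAux (2 ^ (Nat.size v) - 1) v := by
  induction k with
  | zero =>
    have h0 : Nat.size v = 0 := by omega
    rw [h0]
  | succ k ih =>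
    rcases Nat.lt_or_ge (Nat.size v) (k + 1) with hlt | hge
    · have hv : v < 2 ^ k := Nat.size_le.mp (by omega)
      have hk : 1 ≤ 2 ^ k := Nat.one_le_two_pow
      have hkk : 2 ^ (k + 1) = 2 * 2 ^ k := by ring
      rw [scanAux]
      have hne : ¬ (2 ^ (k + 1) - 1 = 0) := by omega
      simp only [hne, dif_neg, not_false_iff]
      have hle : ¬ (2 ^ (k + 1) - 1 ≤ v) := by omega
      simp only [hle, if_false]
      rw [pow_succ_div_two]
      exact ih (by omega)
    · have h1 : Nat.size v = k + 1 := by omega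
      rw [h1]

theorem scan_SL3 (k : Nat) : ∀ a : Nat, scanAux (2 ^ k - 1) (2 ^ (k + 1) + a) = k + a + 2 := by
  induction k with
  | zero => intro a; rw [scanAux]; simp; omega
  | succ k ih =>
    intro a
    have hk : 1 ≤ 2 ^ k := Nat.one_le_two_pow
    have h1 : 2 ^ (k + 1) = 2 * 2 ^ k := by ring
    have h2 : 2 ^ (k + 2) = 4 * 2 ^ k := by ring
    rw [scanAux]
    have hne : ¬ (2 ^ (k + 1) - 1 = 0) := by omega
    simp only [hne, dif_neg, not_false_iff]
    have hle : 2 ^ (k + 1) - 1 ≤ 2 ^ (k + 1 + 1) + a := by omega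
    simp only [hle, if_true]
    rw [pow_succ_div_two]
    have heq : 2 ^ (k + 1 + 1) + a - (2 ^ (k + 1) - 1) = 2 ^ (k + 1) + (a + 1) := by omega
    rw [heq, ih (a + 1)]
    omega

theorem scan_SL2 (h : Nat) : scanAux (2 ^ h - 1) (2 ^ (h + 1) - 1) = h + 1 := by
  cases h with
  | zero => rw [scanAux]; simp
  | succ m =>
    have hm : 1 ≤ 2 ^ m := Nat.one_le_two_pow
    have h1 : 2 ^ (m + 1) = 2 * 2 ^ m := by ring
    have h2 : 2 ^ (m + 2) = 4 * 2 ^ m := by ring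
    rw [scanAux]
    have hne : ¬ (2 ^ (m + 1) - 1 = 0) := by omega
    simp only [hne, dif_neg, not_false_iff]
    have hle : 2 ^ (m + 1) - 1 ≤ 2 ^ (m + 1 + 1) - 1 := by omega
    simp only [hle, if_true]
    rw [pow_succ_div_two]
    have heq : 2 ^ (m + 1 + 1) - 1 - (2 ^ (m + 1) - 1) = 2 ^ (m + 1) + 0 := by omega
    rw [heq, scan_SL3 m 0]

theorem scan_SLspec (h : Nat) : scanAux (2 ^ h - 1) (2 ^ (h + 1) - 2) = h := by
  cases h with
  | zero => rw [scanAux]; simp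
  | succ m =>
    have hm : 1 ≤ 2 ^ m := Nat.one_le_two_pow
    have h1 : 2 ^ (m + 1) = 2 * 2 ^ m := by ring
    have h2 : 2 ^ (m + 2) = 4 * 2 ^ m := by ring
    rw [scanAux]
    have hne : ¬ (2 ^ (m + 1) - 1 = 0) := by omega
    simp only [hne, dif_neg, not_false_iff]
    have hle : 2 ^ (m + 1) - 1 ≤ 2 ^ (m + 1 + 1) - 2 := by omega
    simp only [hle, if_true]
    rw [pow_succ_div_two]
    have heq : 2 ^ (m + 1 + 1) - 2 - (2 ^ (m + 1) - 1) = 2 ^ (m + 1) - 1 := by omega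
    rw [heq, scan_SL2 m]

-- The heart of the equivalence: B's descending all-ones scan computes the same height
-- as A's peel-until-all-ones loop, at every node index n.
theorem scan_eq_peel (n : Nat) :
    scanAux (2 ^ (Nat.size n) - 1) n = Nat.size (peel (n + 1)) - 1 := by
  induction n using Nat.strong_induction_on with
  | _ n ih =>
    by_cases hall : allOnes (n + 1) = true
    · -- n+1 is all ones: peel stops immediately
      rw [peel, dif_pos hall]
      simp only [allOnes, pyBitLen, beq_iff_eq] at hall
      set b := Nat.size (n + 1) with hbdef
      have hb1 : 1 ≤ b := Nat.size_pos.mpr (by omega)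
      rcases Nat.lt_or_ge b 2 with hb2 | hb2
      · -- b = 1, n = 0
        have hbone : b = 1 := by omega
        have hn0 : n = 0 := by rw [hbone] at hall; omega
        subst hn0
        rw [hbone]
        simp [Nat.size_zero, scanAux_zero]
      · -- b ≥ 2, n = 2^b - 2
        have hpow : 2 ^ b = 2 * 2 ^ (b - 1) := by
          conv_lhs => rw [show b = (b - 1) + 1 by omega]
          ring
        have hp2 : 2 ≤ 2 ^ (b - 1) := by
          calc (2:Nat) = 2 ^ 1 := by norm_num
          _ ≤ 2 ^ (b - 1) := Nat.pow_le_pow_right (by norm_num) (by omega)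
        have hsz : Nat.size n = b := size_eq_b (by omega) (by omega) (by omega)
        rw [hsz, scanAux]
        have hne : ¬ (2 ^ b - 1 = 0) := by omega
        simp only [hne, dif_neg, not_false_iff]
        have hle : ¬ (2 ^ b - 1 ≤ n) := by omega
        simp only [hle, if_false]
        have hdiv : (2 ^ b - 1) / 2 = 2 ^ (b - 1) - 1 := by
          conv_lhs => rw [show b = (b - 1) + 1 by omega]
          exact pow_succ_div_two (b - 1)
        rw [hdiv]
        have hn : n = 2 ^ ((b - 1) + 1) - 2 := by omega
        rw [hn, scan_SLspec (b - 1)]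
    · -- n+1 not all ones: peel recurses
      have hn1 : 1 ≤ n + 1 := by omega
      set b := Nat.size (n + 1) with hbdef
      have hb1 : 1 ≤ b := Nat.size_pos.mpr (by omega)
      have hup : n + 1 < 2 ^ b := by rw [hbdef]; exact Nat.lt_size_self (n + 1)
      have hlow : 2 ^ (b - 1) ≤ n + 1 := Nat.lt_size.mp (by omega)
      have hnot : n + 1 ≠ 2 ^ b - 1 := by
        intro hcontra
        apply hall
        simp only [allOnes, pyBitLen, beq_iff_eq, ← hbdef]
        omega
      have hb2 : 2 ≤ b := by
        by_contra hc
        have hbone : b = 1 := by omega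
        rw [hbone] at hup hnot
        omega
      have hpow : 2 ^ b = 2 * 2 ^ (b - 1) := by
        conv_lhs => rw [show b = (b - 1) + 1 by omega]
        ring
      have hp2 : 2 ≤ 2 ^ (b - 1) := by
        calc (2:Nat) = 2 ^ 1 := by norm_num
        _ ≤ 2 ^ (b - 1) := Nat.pow_le_pow_right (by norm_num) (by omega)
      -- one peel step
      rw [peel, dif_neg hall]
      have hmsb : mostSigBit (n + 1) = 2 ^ (b - 1) := by
        simp only [mostSigBit, pyBitLen, ← hbdef]
      rw [hmsb]
      set n' := n - (2 ^ (b - 1) - 1) with hn'def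
      have hstep : n + 1 - (2 ^ (b - 1) - 1) = n' + 1 := by omega
      rw [hstep]
      have hlt : n' < n := by omega
      rw [← ih n' hlt]
      -- now show the two scans agree
      rcases Nat.lt_or_ge n (2 ^ (b - 1)) with hcase | hcase
      · -- n = 2^(b-1) - 1, n' = 0
        have hn'0 : n' = 0 := by omega
        have hszn : Nat.size n = b - 1 := by
          rcases Nat.eq_or_lt_of_le hb2 with h2b | h2b
          · have hne1 : n = 1 := by rw [← h2b] at hcase hlow; omega
            rw [hne1, ← h2b]
            simp [Nat.size_one]
          · have hq : 2 ^ (b - 1) = 2 * 2 ^ (b - 2) := by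
              conv_lhs => rw [show b - 1 = (b - 2) + 1 by omega]
              ring
            have hq2 : 2 ≤ 2 ^ (b - 2) := by
              calc (2:Nat) = 2 ^ 1 := by norm_num
              _ ≤ 2 ^ (b - 2) := Nat.pow_le_pow_right (by norm_num) (by omega)
            have hbb : 2 ^ (b - 1 - 1) = 2 ^ (b - 2) := by
              rw [show b - 1 - 1 = b - 2 by omega]
            exact size_eq_b (by omega) (by omega) (by omega)
        rw [hszn, scanAux]
        have hne : ¬ (2 ^ (b - 1) - 1 = 0) := by omega
        simp only [hne, dif_neg, not_false_iff]
        have hle : 2 ^ (b - 1) - 1 ≤ n := by omega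
        simp only [hle, if_true]
        have hz : n - (2 ^ (b - 1) - 1) = 0 := by omega
        rw [hz, scanAux_zero, hn'0]
        simp [Nat.size_zero, scanAux_zero]
      · -- n ≥ 2^(b-1): size n = b, two scan steps
        have hszn : Nat.size n = b := size_eq_b (by omega) (by omega) (by omega)
        have hdiv : (2 ^ b - 1) / 2 = 2 ^ (b - 1) - 1 := by
          conv_lhs => rw [show b = (b - 1) + 1 by omega]
          exact pow_succ_div_two (b - 1)
        have hdiv2 : (2 ^ (b - 1) - 1) / 2 = 2 ^ (b - 2) - 1 := by
          conv_lhs => rw [show b - 1 = (b - 2) + 1 by omega]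
          exact pow_succ_div_two (b - 2)
        rw [hszn, scanAux]
        have hne : ¬ (2 ^ b - 1 = 0) := by omega
        simp only [hne, dif_neg, not_false_iff]
        have hle : ¬ (2 ^ b - 1 ≤ n) := by omega
        simp only [hle, if_false]
        rw [hdiv, scanAux]
        have hne2 : ¬ (2 ^ (b - 1) - 1 = 0) := by omega
        simp only [hne2, dif_neg, not_false_iff]
        have hle2 : 2 ^ (b - 1) - 1 ≤ n := by omega
        simp only [hle2, if_true]
        have hval : n - (2 ^ (b - 1) - 1) = n' := by omega
        rw [hval, hdiv2]
        -- LHS: scanAux (2^(b-2) - 1) n'; RHS: scanAux (2^(size n') - 1) n'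
        have hub : n' ≤ 2 ^ (b - 1) - 2 := by omega
        rcases Nat.lt_or_ge (Nat.size n') (b - 1) with hsm | hsm
        · exact scan_skip (b - 2) n' (by omega)
        · have hsz' : Nat.size n' = b - 1 := by
            have := Nat.size_le.mpr (show n' < 2 ^ (b - 1) by omega)
            omega
          rw [hsz']
          conv_rhs => rw [scanAux]
          simp only [hne2, dif_neg, not_false_iff]
          have hle3 : ¬ (2 ^ (b - 1) - 1 ≤ n') := by omega
          simp only [hle3, if_false]
          rw [hdiv2]

theorem peel_ge_one : ∀ pos : Nat, 1 ≤ pos → 1 ≤ peel pos := by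
  intro pos
  induction pos using Nat.strong_induction_on with
  | _ pos ih =>
    intro h
    rw [peel]
    split
    · omega
    · rename_i hall
      have hs1 : 1 ≤ Nat.size pos := Nat.size_pos.mpr (by omega)
      have hmsb_le : mostSigBit pos ≤ pos := by
        have := Nat.lt_size.mp (show Nat.size pos - 1 < Nat.size pos by omega)
        simpa [mostSigBit, pyBitLen] using this
      have hmsb1 : 1 ≤ mostSigBit pos := Nat.one_le_two_pow
      exact ih _ (peel_dec pos hall) (by omega)

theorem heights_eq (i : Int) (h : 0 ≤ i) : indexHeightA i = nodeHeightB i := by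
  have hsucc : (i + 1).toNat = i.toNat + 1 := by omega
  have hmain := scan_eq_peel i.toNat
  have hpe : 1 ≤ peel (i.toNat + 1) := peel_ge_one _ (by omega)
  have hsz : 1 ≤ Nat.size (peel (i.toNat + 1)) := Nat.size_pos.mpr (by omega)
  unfold indexHeightA nodeHeightB pyBitLen
  rw [hsucc, hmain]
  omega

theorem heights_nonneg (i : Int) (h : 0 ≤ i) : 0 ≤ indexHeightA i := by
  have hsucc : (i + 1).toNat = i.toNat + 1 := by omega
  have hpe : 1 ≤ peel (i.toNat + 1) := peel_ge_one _ (by omega)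
  have hsz : 1 ≤ Nat.size (peel (i.toNat + 1)) := Nat.size_pos.mpr (by omega)
  unfold indexHeightA pyBitLen
  rw [hsucc]
  omega

theorem go_eq (fuel : Nat) : ∀ (i g c : Int) (path : List Int), 0 ≤ i → 0 ≤ g →
    goA fuel i g c path = path ++ walkB fuel i g c := by
  induction fuel with
  | zero => intro i g c path hi hg; simp [goA, walkB]
  | succ fuel ih =>
    intro i g c path hi hg
    have hpos : (0:Int) < 2 ^ g.toNat := by positivity
    rw [goA, walkB, heights_eq (i + 1) (by omega)]
    by_cases hgt : nodeHeightB (i + 1) > g <;>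
      simp only [hgt, if_true, if_false] <;>
      split_ifs with hc
    · simp
    · rw [ih (i + 1) (g + 1) c _ (by omega) (by omega)]
      simp
    · simp
    · rw [ih (i + 2 * 2 ^ g.toNat) (g + 1) c _ (by omega) (by omega)]
      simp

-- ===== VERDICT (by name: the statement is the Claim_ definition above) =====
theorem inclusion_proof_path_spec : Claim_equal_inclusion_proof_path := by
  intro i c _ hpre
  unfold Spec_inclusion_proof_path inclusion_proof_path inclusion_proof_path_alt
  rw [heights_eq i hpre] at *
  rw [go_eq _ i (nodeHeightB i) c [] hpre (by rw [← heights_eq i hpre]; exact heights_nonneg i hpre)]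
  simp
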